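-- pv_equiv track=rewrite | github.com/Jeong-Siku/TIL | 프로그래머스/unrated/160586. 대충 만든 자판/대충 만든 자판.py | solution
-- ===== SOURCE A (Python) =====
-- def solution(keymap, targets):
--     answer = []
--
--     # 딕셔너리를 초기화 할 때 가능한 모든 값을 넣을 것
--     # 딕셔너리로 각 알파벳 누르는 횟수를 저장하고 최종적으로 최소의 횟수만 남긴 뒤 타겟에서 해당 값을 더해서 구하려고 함
--     # 딕셔너리 값이 최종 keymap의 것만 남음. 최소값을 어떻게 비교하지?
--     prev = {i:100 for i in "".join(keymap)}
--
--     for k in keymap: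
--         for alp in k:
--             if prev[alp] and prev[alp]>=k.index(alp)+1:
--                 prev[alp] = k.index(alp) + 1
--
--     result=[]
--     for tar in targets:
--         cnt=0
--         for a in tar:
--             if a not in prev:
--                 cnt=-1
--                 # break는 해당 for문에만 영향을 끼친다.
--                 break
--             else:
--                 cnt+=prev[a]
--         if cnt:
--             result.append(cnt)
--     return result
-- ===== SOURCE B (Python) =====
-- def solution(keymap, targets):
--     # No precomputed table: for each target char, scan the keymaps directly.
--     # 100 is the problem's "infinity" sentinel (keymap strings have < 100 keys
--     # in the original problem; A uses the same initial value).
--     result = []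
--     for tar in targets:
--         cnt = 0
--         for ch in tar:
--             best = 100
--             found = False
--             for k in keymap:
--                 i = k.find(ch)
--                 if i != -1:
--                     found = True
--                     if i + 1 < best:
--                         best = i + 1
--             if not found:
--                 cnt = -1
--                 break
--             cnt += best
--         if cnt:
--             result.append(cnt)
--     return result
-- ===== Notes on version B (the rewrite author's own statement) =====
-- stated objective: simpler
-- what changed: Drops A's precomputed per-letter dict (built with repeated str.index calls over the joined keymap) and computes each target character's keystroke cost on the fly with one str.find scan per keymap, tracking the minimum directly; trade: it rescans the keymaps per target character, so it is slower on very large targets.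
import Mathlib
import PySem

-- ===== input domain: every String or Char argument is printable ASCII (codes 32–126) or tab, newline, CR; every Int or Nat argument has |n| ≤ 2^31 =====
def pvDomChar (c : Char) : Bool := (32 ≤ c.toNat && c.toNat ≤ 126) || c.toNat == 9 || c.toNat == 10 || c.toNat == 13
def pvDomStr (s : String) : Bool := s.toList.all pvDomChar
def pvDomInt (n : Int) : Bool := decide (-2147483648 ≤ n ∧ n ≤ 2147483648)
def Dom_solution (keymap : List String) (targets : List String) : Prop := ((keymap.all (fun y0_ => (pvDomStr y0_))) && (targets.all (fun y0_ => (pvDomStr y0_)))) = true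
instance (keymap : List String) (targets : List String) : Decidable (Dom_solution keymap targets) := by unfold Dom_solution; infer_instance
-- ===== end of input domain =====

-- B drops A's precomputed per-letter dict and computes each target character's cost by scanning the keymaps directly; plainer code, but it rescans per target character (slower on very large targets).

-- ===== PORT A =====
-- prev = {i:100 for i in "".join(keymap)}; then the double update loop.
def pvPrevDict (keymap : List String) : PySem.Dict Char Int :=
  keymap.foldl (fun d k =>
    k.toList.foldl (fun d alp =>
      -- prev[alp]: alp ∈ k ⊆ joined keymap so the key is always present; getD is exact here.
      -- k.index(alp) = PySem.Chars.find k.toList [alp] since alp is present in k.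
      if d.getD alp 0 ≠ 0 ∧ d.getD alp 0 ≥ PySem.Chars.find k.toList [alp] + 1 then
        d.insert alp (PySem.Chars.find k.toList [alp] + 1)
      else d) d)
    -- prev = {i:100 for i in "".join(keymap)}
    ((PySem.Str.join "" keymap).toList.foldl
      (fun d i => d.insert i 100) PySem.Dict.empty)

-- the 'for a in tar' loop with its break
def pvTarCnt (prev : PySem.Dict Char Int) : List Char → Int → Int
  | [], cnt => cnt
  | a :: rest, cnt =>
      if prev.contains a then pvTarCnt prev rest (cnt + prev.getD a 0)
      else -1   -- cnt = -1; break

def solution (keymap : List String) (targets : List String) : List Int :=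
  let prev := pvPrevDict keymap
  targets.foldl (fun result tar =>
    let cnt := pvTarCnt prev tar.toList 0
    if cnt ≠ 0 then result ++ [cnt] else result) []

-- ===== PORT B =====
-- the inner 'for k in keymap' scan of B, carrying (best, found)
def pvBestScan (keymap : List String) (ch : Char) : Int × Bool :=
  keymap.foldl (fun bf k =>
    let i := PySem.Chars.find k.toList [ch]   -- k.find(ch)
    if i ≠ -1 then (if i + 1 < bf.1 then i + 1 else bf.1, true) else bf) (100, false)

-- the 'for ch in tar' loop of B with its break
def pvCntFor (keymap : List String) : List Char → Int → Int
  | [], cnt => cnt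
  | ch :: rest, cnt =>
      let bf := pvBestScan keymap ch
      if bf.2 then pvCntFor keymap rest (cnt + bf.1)
      else -1   -- cnt = -1; break

def solution_alt (keymap : List String) (targets : List String) : List Int :=
  targets.foldl (fun result tar =>
    let cnt := pvCntFor keymap tar.toList 0
    if cnt ≠ 0 then result ++ [cnt] else result) []

-- ===== PRECONDITION & SPEC =====
def Spec_solution (keymap : List String) (targets : List String) (out : List Int) : Prop := out = solution_alt keymap targets
instance (keymap : List String) (targets : List String) (out : List Int) : Decidable (Spec_solution keymap targets out) := by unfold Spec_solution; infer_instance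

-- ===== CLAIM (what is proved, stated in full; the proofs are below) =====
def Claim_equal_solution : Prop := ∀ (keymap : List String) (targets : List String), Dom_solution keymap targets → Spec_solution keymap targets (solution keymap targets)

-- ===== LEMMAS AND PROOFS =====

theorem pv_find_neg_one_iff (cs : List Char) (c : Char) :
    PySem.Chars.find cs [c] = -1 ↔ c ∉ cs := by
  have := PySem.Str.find_eq_neg_one_iff (String.ofList cs) (String.ofList [c])
  simpa [List.singleton_infix_iff, PySem.Str.find] using this

theorem pv_find_go_nonneg (cs : List Char) (c : Char) : ∀ k : Nat, c ∈ cs →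
    0 ≤ PySem.Chars.find.go [c] cs k := by
  induction cs with
  | nil => simp
  | cons x t ih =>
      intro k hc
      simp only [PySem.Chars.find.go]
      by_cases hp : List.isPrefixOf [c] (x :: t)
      · simp [hp]
      · have hx : x ≠ c := by
          intro h; subst h; simp [List.isPrefixOf] at hp
        have : c ∈ t := by
          rcases List.mem_cons.mp hc with h | h
          · exact absurd h.symm hx
          · exact h
        simpa [hp] using ih (k + 1) this

theorem pv_find_nonneg (cs : List Char) (c : Char) (h : c ∈ cs) :
    0 ≤ PySem.Chars.find cs [c] := pv_find_go_nonneg cs c 0 h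

theorem pv_mem_join (km : List String) (c : Char) :
    c ∈ (PySem.Str.join "" km).toList ↔ ∃ k ∈ km, c ∈ k.toList := by
  have hj : (PySem.Str.join "" km).toList = PySem.Chars.join [] (km.map String.toList) := by
    simp [PySem.Str.join]
  have hfl : PySem.Chars.join [] (km.map String.toList) = (km.map String.toList).flatten := by
    simp only [PySem.Chars.join]
    induction (km.map String.toList) with
    | nil => simp [List.intercalate]
    | cons p ps ih => cases ps <;> simp_all [List.intercalate, List.intersperse]
  rw [hj, hfl, List.mem_flatten]
  simp

-- the init dict
theorem pv_init_get? (L : List Char) (c : Char) (d : PySem.Dict Char Int) :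
    (L.foldl (fun d i => d.insert i 100) d).get? c =
      if c ∈ L then some 100 else d.get? c := by
  induction L generalizing d with
  | nil => simp
  | cons x L ih =>
      simp only [List.foldl_cons, ih, PySem.Dict.get?_insert]
      by_cases hx : c = x <;> simp [hx]

theorem pv_inner_get? (w : List Char) (sfx : List Char) (hsub : ∀ a ∈ sfx, a ∈ w)
    (d : PySem.Dict Char Int) (c : Char) (hv : ∀ v, d.get? c = some v → 1 ≤ v) :
    (sfx.foldl (fun d alp =>
      if d.getD alp 0 ≠ 0 ∧ d.getD alp 0 ≥ PySem.Chars.find w [alp] + 1 then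
        d.insert alp (PySem.Chars.find w [alp] + 1)
      else d) d).get? c =
      if c ∈ sfx then (d.get? c).map (fun v => min v (PySem.Chars.find w [c] + 1))
      else d.get? c := by
  induction sfx generalizing d with
  | nil => simp
  | cons alp rest ih =>
      have hsub' : ∀ a ∈ rest, a ∈ w := fun a ha => hsub a (List.mem_cons_of_mem _ ha)
      by_cases hac : c = alp
      · subst hac
        have hw : c ∈ w := hsub c (List.mem_cons_self ..)
        have hi : 1 ≤ PySem.Chars.find w [c] + 1 := by
          have := pv_find_nonneg w c hw; omega
        cases hdc : d.get? c with
        | none =>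
            have hg : d.getD c 0 = 0 := by
              simp [PySem.Dict.getD_eq_get?_getD, hdc]
            simp only [List.foldl_cons, hg]
            rw [if_neg (by simp), ih hsub' d hv]
            simp [hdc]
        | some v =>
            have hv1 : 1 ≤ v := hv v hdc
            have hg : d.getD c 0 = v := by
              simp [PySem.Dict.getD_eq_get?_getD, hdc]
            simp only [List.foldl_cons, hg]
            by_cases hge : v ≥ PySem.Chars.find w [c] + 1
            · have hcond : (v ≠ 0 ∧ v ≥ PySem.Chars.find w [c] + 1) := ⟨by omega, hge⟩
              rw [if_pos hcond, ih hsub' _ ?_]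
              · have hins : (d.insert c (PySem.Chars.find w [c] + 1)).get? c
                    = some (PySem.Chars.find w [c] + 1) := by
                  simp
                rw [hins]
                simp
                omega
              · intro u hu
                rw [PySem.Dict.get?_insert] at hu
                simp at hu; omega
            · rw [if_neg (by omega), ih hsub' d hv]
              simp [hdc]
              intro _
              omega
      · have hne : c ≠ alp := hac
        simp only [List.foldl_cons]
        have hpres : ∀ (d' : PySem.Dict Char Int),
            ((if d'.getD alp 0 ≠ 0 ∧ d'.getD alp 0 ≥ PySem.Chars.find w [alp] + 1 then
              d'.insert alp (PySem.Chars.find w [alp] + 1) else d') : PySem.Dict Char Int).get? c = d'.get? c := by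
          intro d'
          split
          · simp [PySem.Dict.get?_insert, hne]
          · rfl
        rw [ih hsub' _ (by intro u hu; rw [hpres] at hu; exact hv u hu)]
        rw [hpres d]
        simp [List.mem_cons, hne]

-- B's scan characterized: best = a min-fold, found = any
theorem pv_bestScan_eq (km : List String) (c : Char) (b0 : Int) (f0 : Bool) :
    km.foldl (fun bf k =>
      let i := PySem.Chars.find k.toList [c]
      if i ≠ -1 then (if i + 1 < bf.1 then i + 1 else bf.1, true) else bf) (b0, f0) =
    (km.foldl (fun v k => if c ∈ k.toList then min v (PySem.Chars.find k.toList [c] + 1) else v) b0,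
     f0 || km.any (fun k => decide (c ∈ k.toList))) := by
  induction km generalizing b0 f0 with
  | nil => simp
  | cons k rest ih =>
      by_cases hc : c ∈ k.toList
      · have hne : PySem.Chars.find k.toList [c] ≠ -1 := by
          rw [ne_eq, pv_find_neg_one_iff]; simpa using hc
        have hmin : (if PySem.Chars.find k.toList [c] + 1 < b0 then PySem.Chars.find k.toList [c] + 1 else b0)
            = min b0 (PySem.Chars.find k.toList [c] + 1) := by
          rw [min_def]; split <;> split <;> omega
        have hhead : (let i := PySem.Chars.find k.toList [c]
            if i ≠ -1 then (if i + 1 < (b0, f0).1 then i + 1 else (b0, f0).1, true) else (b0, f0))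
            = ((min b0 (PySem.Chars.find k.toList [c] + 1), true) : Int × Bool) := by
          simp [hne, hmin]
        rw [List.foldl_cons, hhead, ih, List.foldl_cons, List.any_cons]
        simp [hc]
      · have hne : PySem.Chars.find k.toList [c] = -1 := by
          rw [pv_find_neg_one_iff]; simpa using hc
        have hhead : (let i := PySem.Chars.find k.toList [c]
            if i ≠ -1 then (if i + 1 < (b0, f0).1 then i + 1 else (b0, f0).1, true) else (b0, f0))
            = ((b0, f0) : Int × Bool) := by
          simp [hne]
        rw [List.foldl_cons, hhead, ih, List.foldl_cons, List.any_cons]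
        simp [hc]

-- outer fold of A's update phase, pointwise at c, as an Option fold
theorem pv_outer_get? (km : List String) (d : PySem.Dict Char Int) (c : Char)
    (hv : ∀ v, d.get? c = some v → 1 ≤ v) :
    (km.foldl (fun d k =>
      k.toList.foldl (fun d alp =>
        if d.getD alp 0 ≠ 0 ∧ d.getD alp 0 ≥ PySem.Chars.find k.toList [alp] + 1 then
          d.insert alp (PySem.Chars.find k.toList [alp] + 1)
        else d) d) d).get? c =
    km.foldl (fun o k =>
      if c ∈ k.toList then o.map (fun v => min v (PySem.Chars.find k.toList [c] + 1)) else o)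
      (d.get? c) := by
  induction km generalizing d with
  | nil => simp
  | cons k rest ih =>
      simp only [List.foldl_cons]
      have hstep := pv_inner_get? k.toList k.toList (fun a ha => ha) d c hv
      rw [ih _ ?_, hstep]
      intro u hu
      rw [hstep] at hu
      by_cases hc : c ∈ k.toList
      · simp only [if_pos hc] at hu
        cases hdc : d.get? c with
        | none => simp [hdc] at hu
        | some v =>
            have := hv v hdc
            have hw := pv_find_nonneg k.toList c hc
            simp [hdc] at hu
            omega
      · simp only [if_neg hc] at hu
        exact hv u hu

-- an Option fold starting at some v0 is a value fold
theorem pv_optfold_some (km : List String) (c : Char) (v0 : Int) :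
    km.foldl (fun o k =>
      if c ∈ k.toList then o.map (fun v => min v (PySem.Chars.find k.toList [c] + 1)) else o)
      (some v0) =
    some (km.foldl (fun v k => if c ∈ k.toList then min v (PySem.Chars.find k.toList [c] + 1) else v) v0) := by
  induction km generalizing v0 with
  | nil => rfl
  | cons k rest ih =>
      simp only [List.foldl_cons]
      by_cases hc : c ∈ k.toList <;> simp [hc, ih]

theorem pv_optfold_none (km : List String) (c : Char) (h : ∀ k ∈ km, c ∉ k.toList) :
    km.foldl (fun o k =>
      if c ∈ k.toList then o.map (fun v => min v (PySem.Chars.find k.toList [c] + 1)) else o)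
      none = none := by
  induction km with
  | nil => rfl
  | cons k rest ih =>
      have := h k (List.mem_cons_self ..)
      simp only [List.foldl_cons, if_neg this]
      exact ih (fun k' hk' => h k' (List.mem_cons_of_mem _ hk'))

-- the whole prev dict, pointwise: exactly B's scan
theorem pv_prev_get? (km : List String) (c : Char) :
    (pvPrevDict km).get? c =
      if (pvBestScan km c).2 then some (pvBestScan km c).1 else none := by
  have hinit : ((PySem.Str.join "" km).toList.foldl
      (fun d i => d.insert i 100) (PySem.Dict.empty : PySem.Dict Char Int)).get? c =
      if c ∈ (PySem.Str.join "" km).toList then some 100 else none := by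
    rw [pv_init_get?]; simp
  have hv : ∀ v, ((PySem.Str.join "" km).toList.foldl
      (fun d i => d.insert i 100) (PySem.Dict.empty : PySem.Dict Char Int)).get? c = some v → 1 ≤ v := by
    intro v hsome
    rw [hinit] at hsome
    split at hsome <;> simp_all
    omega
  unfold pvPrevDict pvBestScan
  rw [pv_outer_get? km _ c hv, hinit, pv_bestScan_eq km c 100 false]
  by_cases hc : c ∈ (PySem.Str.join "" km).toList
  · obtain ⟨k, hk, hck⟩ := (pv_mem_join km c).mp hc
    have hany : km.any (fun k => decide (c ∈ k.toList)) = true := by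
      simp only [List.any_eq_true]
      exact ⟨k, hk, by simpa using hck⟩
    rw [if_pos hc, pv_optfold_some]
    simp [hany]
  · have hall : ∀ k ∈ km, c ∉ k.toList := by
      intro k hk hck
      exact hc ((pv_mem_join km c).mpr ⟨k, hk, hck⟩)
    have hany : km.any (fun k => decide (c ∈ k.toList)) = false := by
      simp only [List.any_eq_false]
      intro k hk
      simpa using hall k hk
    rw [if_neg hc, pv_optfold_none km c hall]
    simp [hany]

-- the per-target loops agree
theorem pv_cnt_eq (km : List String) (tl : List Char) (cnt : Int) :
    pvTarCnt (pvPrevDict km) tl cnt = pvCntFor km tl cnt := by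
  induction tl generalizing cnt with
  | nil => rfl
  | cons a rest ih =>
      simp only [pvTarCnt, pvCntFor, PySem.Dict.contains_eq_isSome_get?,
        PySem.Dict.getD_eq_get?_getD, pv_prev_get? km a]
      by_cases hf : (pvBestScan km a).2 <;> simp [hf, ih]

-- ===== VERDICT (by name: the statement is the Claim_ definition above) =====
theorem solution_spec : Claim_equal_solution := by
  intro keymap targets _
  unfold Spec_solution solution solution_alt
  simp only [pv_cnt_eq]
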